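-- pv_equiv track=rewrite | github.com/TobiasForner/AdventOfCode | 2020/day05_passes.py | calculate_pos
-- ===== SOURCE A (Python) =====
-- def calculate_pos(s, first, bounds):
--     middle = bounds[0] + (bounds[1] - bounds[0])//2
--     if not s:
--         return bounds[0]
--     if s[0] == first:
--         return calculate_pos(s[1:], first, (bounds[0], middle))
--     else:
--         return calculate_pos(s[1:], first, (middle + 1, bounds[1]))
-- ===== SOURCE B (Python) =====
-- def calculate_pos(s, first, bounds):
--     lo, hi = bounds[0], bounds[1]
--     for c in s:
--         mid = lo + (hi - lo) // 2
--         if c == first: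
--             hi = mid
--         else:
--             lo = mid + 1
--     return lo
-- ===== Notes on version B (the rewrite author's own statement) =====
-- stated objective: faster
-- what changed: Replaced the recursion that re-slices the string and rebuilds a bounds pair at every step with one iterative left-to-right pass over the characters maintaining lo/hi accumulators.
import Mathlib
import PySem

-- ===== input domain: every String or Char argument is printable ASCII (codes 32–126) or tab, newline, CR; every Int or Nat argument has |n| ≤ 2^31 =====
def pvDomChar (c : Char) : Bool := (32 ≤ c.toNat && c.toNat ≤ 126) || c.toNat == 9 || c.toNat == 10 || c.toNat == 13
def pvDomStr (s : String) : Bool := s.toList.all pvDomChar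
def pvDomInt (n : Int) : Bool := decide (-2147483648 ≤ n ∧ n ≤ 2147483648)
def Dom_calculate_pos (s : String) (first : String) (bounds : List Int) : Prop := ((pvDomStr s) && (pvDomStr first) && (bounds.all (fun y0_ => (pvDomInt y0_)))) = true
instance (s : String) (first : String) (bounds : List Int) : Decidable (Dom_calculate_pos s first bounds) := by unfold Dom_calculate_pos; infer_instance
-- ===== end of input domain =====

-- B replaces A's O(n^2) slicing recursion by a single iterative pass with lo/hi accumulators.
-- ===== PORT A =====
-- A recurses on the string, re-reading bounds[0]/bounds[1] and passing a fresh 2-element bounds.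
def calcA : List Char → List Char → List Int → Int
  | cs, f, bounds =>
    let b0 := (PySem.List.pyGet? bounds 0).getD 0
    let b1 := (PySem.List.pyGet? bounds 1).getD 0
    let middle := b0 + PySem.Int.floordiv (b1 - b0) 2
    match cs with
    | [] => b0
    | c :: rest =>
      if [c] = f then calcA rest f [b0, middle]
      else calcA rest f [middle + 1, b1]

def calculate_pos (s : String) (first : String) (bounds : List Int) : Int :=
  calcA s.toList first.toList bounds

-- ===== PORT B =====
def calculate_pos_alt (s : String) (first : String) (bounds : List Int) : Int :=
  let lo := (PySem.List.pyGet? bounds 0).getD 0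
  let hi := (PySem.List.pyGet? bounds 1).getD 0
  (s.toList.foldl (fun (p : Int × Int) c =>
      let mid := p.1 + PySem.Int.floordiv (p.2 - p.1) 2
      if [c] = first.toList then (p.1, mid) else (mid + 1, p.2)) (lo, hi)).1

-- ===== PRECONDITION & SPEC =====
-- Python A evaluates bounds[0] and bounds[1] unconditionally, so it raises IndexError when
-- bounds has fewer than two elements; Pre_ excludes exactly those inputs.
def Pre_calculate_pos (s : String) (first : String) (bounds : List Int) : Prop := 2 ≤ bounds.length
instance (s : String) (first : String) (bounds : List Int) : Decidable (Pre_calculate_pos s first bounds) := by unfold Pre_calculate_pos; infer_instance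
def pvWitness_calculate_pos : String × String × List Int := ("FBF", "F", [0, 7])
def Spec_calculate_pos (s : String) (first : String) (bounds : List Int) (out : Int) : Prop := out = calculate_pos_alt s first bounds
instance (s : String) (first : String) (bounds : List Int) (out : Int) : Decidable (Spec_calculate_pos s first bounds out) := by unfold Spec_calculate_pos; infer_instance

-- ===== CLAIM (what is proved, stated in full; the proofs are below) =====
def Claim_equal_calculate_pos : Prop := ∀ (s : String) (first : String) (bounds : List Int), Dom_calculate_pos s first bounds → Pre_calculate_pos s first bounds → Spec_calculate_pos s first bounds (calculate_pos s first bounds)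

-- ===== LEMMAS AND PROOFS =====

lemma calcA_eq_foldl (cs f : List Char) (lo hi : Int) :
    calcA cs f [lo, hi] =
      (cs.foldl (fun (p : Int × Int) c =>
        let mid := p.1 + PySem.Int.floordiv (p.2 - p.1) 2
        if [c] = f then (p.1, mid) else (mid + 1, p.2)) (lo, hi)).1 := by
  induction cs generalizing lo hi with
  | nil => rw [calcA.eq_def]; simp [PySem.List.pyGet?, PySem.List.pyIdx?]
  | cons c rest ih =>
    rw [calcA.eq_def]
    simp only [PySem.List.pyGet?, PySem.List.pyIdx?, List.foldl_cons]
    norm_num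
    split_ifs with h <;> rw [ih] <;> simp [h]

lemma calcA_drop (cs f : List Char) (b0 b1 : Int) (rest : List Int) :
    calcA cs f (b0 :: b1 :: rest) = calcA cs f [b0, b1] := by
  rw [calcA.eq_def, calcA.eq_def]
  have e0 : (PySem.List.pyGet? (b0 :: b1 :: rest) 0).getD 0 = b0 := by
    simp [PySem.List.pyGet?, PySem.List.pyIdx?, show (0:Int) ≤ (rest.length:Int) + 1 by omega]
  have e1 : (PySem.List.pyGet? (b0 :: b1 :: rest) 1).getD 0 = b1 := by
    simp [PySem.List.pyGet?, PySem.List.pyIdx?, show (1:Int) ≤ (rest.length:Int) + 1 by omega]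
  have f0 : (PySem.List.pyGet? [b0, b1] 0).getD 0 = b0 := by
    simp [PySem.List.pyGet?, PySem.List.pyIdx?]
  have f1 : (PySem.List.pyGet? [b0, b1] 1).getD 0 = b1 := by
    simp [PySem.List.pyGet?, PySem.List.pyIdx?]
  simp only [e0, e1, f0, f1]

-- ===== VERDICT (by name: the statement is the Claim_ definition above) =====
theorem calculate_pos_spec : Claim_equal_calculate_pos := by
  intro s first bounds _ hpre
  unfold Spec_calculate_pos calculate_pos calculate_pos_alt
  match bounds, hpre with
  | b0 :: b1 :: rest, _ =>
    have e0 : (PySem.List.pyGet? (b0 :: b1 :: rest) 0).getD 0 = b0 := by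
      simp [PySem.List.pyGet?, PySem.List.pyIdx?, show (0:Int) ≤ (rest.length:Int) + 1 by omega]
    have e1 : (PySem.List.pyGet? (b0 :: b1 :: rest) 1).getD 0 = b1 := by
      simp [PySem.List.pyGet?, PySem.List.pyIdx?, show (1:Int) ≤ (rest.length:Int) + 1 by omega]
    rw [e0, e1, ← calcA_eq_foldl, calcA_drop]
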